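-- pv_equiv track=rewrite | github.com/B-UMMI/LMAS | templates/utils.py | get_check_overlap
-- ===== SOURCE A (Python) =====
-- def get_check_overlap(list_of_coords):
--     """
--     Function that takes a list of coords and returns a list with overlap lengths
--     :param list_of_coords: list of lists containing start (0 based, closed) and stop (0 based, open) positions
--     return: list with overlap lengths
--     """
--     sorted_list_of_coords = sorted(list_of_coords, key=lambda x: x[0])
--     list_of_ranges = []
--     overlaps = []
--     for coods in sorted_list_of_coords:
--         x = range(coods[0],coods[1])
--         list_of_ranges.append(set(x))
--     for i in range(len(list_of_ranges)-1):
--         overlaps.append(len(list_of_ranges[i].intersection(list_of_ranges[i+1])))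
--     return overlaps
-- ===== SOURCE B (Python) =====
-- def get_check_overlap(list_of_coords):
--     s = sorted(list_of_coords, key=lambda x: x[0])
--     return [max(0, min(c1[1], c2[1]) - max(c1[0], c2[0]))
--             for c1, c2 in zip(s, s[1:])]
-- ===== Notes on version B (the rewrite author's own statement) =====
-- stated objective: faster
-- what changed: Instead of materialising each interval as a Python set of all its points and intersecting consecutive sets, B sorts by start and computes each consecutive overlap arithmetically as max(0, min(stops) - max(starts)).
import Mathlib
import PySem

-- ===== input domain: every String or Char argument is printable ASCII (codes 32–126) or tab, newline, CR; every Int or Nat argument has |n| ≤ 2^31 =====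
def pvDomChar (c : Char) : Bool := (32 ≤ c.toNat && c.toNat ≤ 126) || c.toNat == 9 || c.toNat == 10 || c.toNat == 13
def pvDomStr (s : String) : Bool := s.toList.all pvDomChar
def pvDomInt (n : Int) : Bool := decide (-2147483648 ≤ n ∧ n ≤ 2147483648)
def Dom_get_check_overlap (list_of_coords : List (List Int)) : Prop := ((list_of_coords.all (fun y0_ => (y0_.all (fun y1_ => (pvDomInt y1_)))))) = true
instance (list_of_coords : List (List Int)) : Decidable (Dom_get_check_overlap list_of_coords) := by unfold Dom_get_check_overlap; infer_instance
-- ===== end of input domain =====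

-- B replaces A's per-interval point sets and set intersections by the arithmetic
-- overlap formula max(0, min(stops) - max(starts)) on consecutive start-sorted pairs.

-- ===== PORT A =====
-- A: sort by x[0]; build set(range(c[0], c[1])) per coord; overlap i = |ranges[i] ∩ ranges[i+1]|.
-- Indexing uses pyGetD with a default; under Pre_ (every inner list has ≥ 2 elements) all
-- indices A reads are in range, so the default is never the value Python would raise on.
def get_check_overlap (list_of_coords : List (List Int)) : List Int :=
  let sorted_list_of_coords :=
    PySem.List.sorted list_of_coords (fun x => PySem.List.pyGetD x 0 0) false
  let list_of_ranges : List (PySem.Set Int) :=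
    sorted_list_of_coords.foldl
      (fun acc coods =>
        acc ++ [PySem.Set.ofList
          (PySem.List.pyRange (PySem.List.pyGetD coods 0 0) (PySem.List.pyGetD coods 1 0) 1)])
      []
  (PySem.List.pyRange 0 ((list_of_ranges.length : Int) - 1) 1).foldl
    (fun overlaps i =>
      overlaps ++ [((PySem.Set.inter (PySem.List.pyGetD list_of_ranges i [])
                      (PySem.List.pyGetD list_of_ranges (i + 1) [])).length : Int)])
    []

-- ===== PORT B =====
def get_check_overlap_alt (list_of_coords : List (List Int)) : List Int :=
  let s := PySem.List.sorted list_of_coords (fun x => PySem.List.pyGetD x 0 0) false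
  (s.zip (PySem.List.slice s (some 1) none)).map
    (fun p => max 0 (min (PySem.List.pyGetD p.1 1 0) (PySem.List.pyGetD p.2 1 0)
                     - max (PySem.List.pyGetD p.1 0 0) (PySem.List.pyGetD p.2 0 0)))

-- ===== PRECONDITION & SPEC =====
-- Pre_ excludes exactly the inputs on which Python A raises IndexError: an inner list with
-- fewer than 2 elements (the sort key reads x[0] and the loop reads coods[1]).
def Pre_get_check_overlap (list_of_coords : List (List Int)) : Prop :=
  ∀ c ∈ list_of_coords, 2 ≤ c.length
instance (list_of_coords : List (List Int)) : Decidable (Pre_get_check_overlap list_of_coords) := by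
  unfold Pre_get_check_overlap; infer_instance

def pvWitness_get_check_overlap : List (List Int) := [[0, 5], [3, 8], [7, 9]]

def Spec_get_check_overlap (list_of_coords : List (List Int)) (out : List Int) : Prop := out = get_check_overlap_alt list_of_coords
instance (list_of_coords : List (List Int)) (out : List Int) : Decidable (Spec_get_check_overlap list_of_coords out) := by unfold Spec_get_check_overlap; infer_instance

-- ===== CLAIM (what is proved, stated in full; the proofs are below) =====
def Claim_equal_get_check_overlap : Prop := ∀ (list_of_coords : List (List Int)), Dom_get_check_overlap list_of_coords → Pre_get_check_overlap list_of_coords → Spec_get_check_overlap list_of_coords (get_check_overlap list_of_coords)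

-- ===== LEMMAS AND PROOFS =====

-- set(xs) is xs itself when xs has no duplicates
lemma ofList_of_nodup_aux {acc l : List Int} (hl : l.Nodup) (hd : ∀ x ∈ l, x ∉ acc) :
    List.foldl PySem.Set.add acc l = acc ++ l := by
  induction l generalizing acc with
  | nil => simp
  | cons x t ih =>
    have hx : PySem.Set.add acc x = acc ++ [x] := by
      simp [PySem.Set.add, PySem.Set.contains]
      intro hmem
      exact absurd hmem (hd x (by simp))
    simp only [List.foldl_cons, hx]
    rw [ih (List.nodup_cons.mp hl).2]
    · simp
    · intro y hy
      simp only [List.mem_append, List.mem_singleton]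
      rintro (h | rfl)
      · exact hd y (by simp [hy]) h
      · exact (List.nodup_cons.mp hl).1 hy

lemma ofList_of_nodup {l : List Int} (hl : l.Nodup) : PySem.Set.ofList l = l := by
  have := ofList_of_nodup_aux (acc := []) hl (by simp)
  simpa [PySem.Set.ofList, PySem.Set.empty] using this

-- counting the integers a+k, k < n, lying in [c, d)
lemma countP_range_interval (a c d : Int) (n : Nat) :
    (List.range n).countP (fun k : Nat => decide (c ≤ a + (k : Int) ∧ a + (k : Int) < d))
      = (min d (a + n) - max a c).toNat := by
  induction n with
  | zero => simp; omega
  | succ n ih =>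
    rw [List.range_succ, List.countP_append, ih]
    by_cases h : c ≤ a + (n : Int) ∧ a + (n : Int) < d
    · simp only [List.countP_cons, List.countP_nil, h, decide_true, and_self]
      push_cast; omega
    · simp only [List.countP_cons, List.countP_nil, decide_eq_true_eq, h]
      push_cast; omega

-- the size of set(range(a,b)) ∩ set(range(c,d)) is the arithmetic overlap
lemma inter_range_length (a b c d : Int) :
    ((PySem.Set.inter (PySem.Set.ofList (PySem.List.pyRange a b 1))
        (PySem.Set.ofList (PySem.List.pyRange c d 1))).length : Int)
      = max 0 (min b d - max a c) := by
  rw [ofList_of_nodup (PySem.List.nodup_pyRange_one a b),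
      ofList_of_nodup (PySem.List.nodup_pyRange_one c d)]
  have hfil : ∀ x : Int,
      (PySem.Set.contains (PySem.List.pyRange c d 1) x)
        = decide (c ≤ x ∧ x < d) := by
    intro x
    simp [PySem.Set.contains, PySem.List.mem_pyRange_one]
  unfold PySem.Set.inter
  rw [List.filter_congr (fun x _ => hfil x)]
  rw [PySem.List.pyRange_one a b, List.filter_map, List.length_map,
      ← List.countP_eq_length_filter]
  rw [show ((fun x => decide (c ≤ x ∧ x < d)) ∘ fun k : Nat => a + (k : Int))
      = fun k : Nat => decide (c ≤ a + (k : Int) ∧ a + (k : Int) < d) from rfl]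
  rw [countP_range_interval a c d]
  omega

-- indexing consecutive pairs of xs equals zipping xs with its tail
lemma getD_pairs_eq_zip {α β : Type} (xs : List α) (d : α) (f : α → α → β) :
    (List.range (xs.length - 1)).map
        (fun k => f (xs.getD k d) (xs.getD (k + 1) d))
      = (xs.zip xs.tail).map (fun p => f p.1 p.2) := by
  induction xs with
  | nil => simp
  | cons x t ih =>
    cases t with
    | nil => simp
    | cons y u =>
      have hlen : (x :: y :: u).length - 1 = ((y :: u).length - 1) + 1 := by
        simp
      rw [hlen, List.range_succ_eq_map]
      simp only [List.map_cons, List.map_map]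
      rw [show ((fun k => f ((x :: y :: u).getD k d) ((x :: y :: u).getD (k + 1) d)) ∘
            (fun i => i + 1))
          = (fun k => f ((y :: u).getD k d) ((y :: u).getD (k + 1) d)) from rfl]
      rw [ih]
      simp

-- s[1:] of a list is its tail
lemma slice_one_eq_tail {α : Type} (s : List α) :
    PySem.List.slice s (some 1) none = s.tail := by
  rw [PySem.List.slice_from s (by omega : (0:Int) ≤ 1)]
  simp

-- range(0, m) mapped through F, as a List.range loop
lemma map_pyRange_zero' {β : Type} (m : Int) (F : Int → β) :
    (PySem.List.pyRange 0 m 1).map F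
      = (List.range m.toNat).map (fun k : Nat => F (k : Int)) := by
  rw [PySem.List.pyRange_one, List.map_map]
  simp [Function.comp]

-- ===== VERDICT (by name: the statement is the Claim_ definition above) =====
theorem get_check_overlap_spec : Claim_equal_get_check_overlap := by
  intro l _ _
  show get_check_overlap l = get_check_overlap_alt l
  unfold get_check_overlap get_check_overlap_alt
  set s := PySem.List.sorted l (fun x => PySem.List.pyGetD x 0 0) false with hs
  simp only [PySem.List.foldl_append_singleton_eq_map, List.nil_append]
  set r : List Int → PySem.Set Int := fun c =>
    PySem.Set.ofList
      (PySem.List.pyRange (PySem.List.pyGetD c 0 0) (PySem.List.pyGetD c 1 0) 1) with hr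
  have hnil : r [] = ([] : PySem.Set Int) := by rw [hr]; decide
  have hget : ∀ i : Nat, PySem.List.pyGetD (List.map r s) (i : Int) [] = r (s.getD i []) := by
    intro i
    rw [PySem.List.pyGetD_natCast]
    rcases lt_or_ge i s.length with h | h
    · rw [List.getD_eq_getElem _ _ (by simpa using h), List.getD_eq_getElem _ _ h]
      simp
    · rw [List.getD_eq_default _ _ (by simpa using h), List.getD_eq_default _ _ h, hnil]
  rw [slice_one_eq_tail, map_pyRange_zero']
  rw [show (((List.map r s).length : Int) - 1).toNat = s.length - 1 by
        rw [List.length_map]; omega]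
  rw [← getD_pairs_eq_zip s []
        (fun c1 c2 => max 0 (min (PySem.List.pyGetD c1 1 0) (PySem.List.pyGetD c2 1 0)
                 - max (PySem.List.pyGetD c1 0 0) (PySem.List.pyGetD c2 0 0)))]
  refine List.map_congr_left (fun k _ => ?_)
  rw [show ((k : Int) + 1) = ((k + 1 : Nat) : Int) by push_cast; ring]
  rw [hget k, hget (k + 1)]
  simp only [hr]
  exact inter_range_length _ _ _ _
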